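-- pv_equiv track=rewrite | github.com/ca-montenegro/Simod_Resources | extraction/role_discovery.py | det_Act_freq_matrix
-- ===== SOURCE A (Python) =====
-- def det_Act_freq_matrix(dictionary,usersLen):
--     freq_matrix = dict()
--     for vals in dictionary:
--         userindex = vals[1]
--         taskindex = vals[0]
--         if taskindex in freq_matrix:
--             count = freq_matrix[taskindex][userindex]
--             count += 1
--             freq_matrix[taskindex][userindex] = count
--         else:
--             taskis = [0, ] * usersLen
--             taskis[userindex] = 1
--             freq_matrix[taskindex] = taskis
--     return freq_matrix
-- ===== SOURCE B (Python) =====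
-- def det_Act_freq_matrix(dictionary, usersLen):
--     # Pass 1: group the user indices (with multiplicity) by task, in first-occurrence order.
--     per_task = {}
--     for taskindex, userindex in dictionary:
--         per_task.setdefault(taskindex, []).append(userindex)
--     # Pass 2: densify each group into a [0]*usersLen row of counts.
--     freq_matrix = {}
--     for taskindex, users in per_task.items():
--         row = [0] * usersLen
--         for userindex in users:
--             row[userindex] += 1
--         freq_matrix[taskindex] = row
--     return freq_matrix
-- ===== Notes on version B (the rewrite author's own statement) =====
-- stated objective: alternative
-- what changed: A makes a single pass that branches inline on seen/unseen tasks, mutating dense rows as it goes; B separates concerns into two passes: first group the user indices by task with setdefault/append, then densify each group into a [0]*usersLen count row.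
import Mathlib
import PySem

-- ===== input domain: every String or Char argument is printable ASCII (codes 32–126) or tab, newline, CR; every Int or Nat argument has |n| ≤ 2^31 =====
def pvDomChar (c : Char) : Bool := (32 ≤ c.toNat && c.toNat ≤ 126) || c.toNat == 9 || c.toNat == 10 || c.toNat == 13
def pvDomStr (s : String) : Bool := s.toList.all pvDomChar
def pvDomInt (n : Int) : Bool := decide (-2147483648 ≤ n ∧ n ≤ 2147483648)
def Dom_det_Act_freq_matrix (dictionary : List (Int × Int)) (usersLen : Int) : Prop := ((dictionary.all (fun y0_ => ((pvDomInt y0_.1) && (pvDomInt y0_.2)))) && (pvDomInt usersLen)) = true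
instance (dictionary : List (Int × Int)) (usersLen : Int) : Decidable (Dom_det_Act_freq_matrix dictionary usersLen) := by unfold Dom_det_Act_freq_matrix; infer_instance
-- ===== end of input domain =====

-- B replaces A's single pass with its inline seen/unseen branching by two passes — group the user
-- indices by task, then densify each group into a count row (objective: alternative decomposition).

-- ===== PORT A =====
-- row reads/writes xs[i] with pyGetD/pySetD: exact on in-range indices; Pre_ excludes the IndexError inputs.
def det_Act_freq_matrix (dictionary : List (Int × Int)) (usersLen : Int) : List (Int × List Int) :=
  (dictionary.foldl (fun freq_matrix vals =>
      let userindex := vals.2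
      let taskindex := vals.1
      match freq_matrix.get? taskindex with
      | some row =>
          -- count = freq_matrix[taskindex][userindex]; count += 1; freq_matrix[taskindex][userindex] = count
          let count := PySem.List.pyGetD row userindex 0 + 1
          freq_matrix.insert taskindex (PySem.List.pySetD row userindex count)
      | none =>
          -- taskis = [0,]*usersLen; taskis[userindex] = 1
          let taskis := List.replicate usersLen.toNat (0 : Int)
          freq_matrix.insert taskindex (PySem.List.pySetD taskis userindex 1))
    PySem.Dict.empty).items

-- ===== PORT B =====
def det_Act_freq_matrix_alt (dictionary : List (Int × Int)) (usersLen : Int) : List (Int × List Int) :=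
  -- Pass 1: per_task.setdefault(taskindex, []).append(userindex)
  -- Pass 2: row = [0]*usersLen; for userindex in users: row[userindex] += 1; freq_matrix[taskindex] = row
  ((dictionary.foldl (fun per_task p => per_task.modify p.1 [] (fun us => us ++ [p.2]))
      PySem.Dict.empty).items.foldl (fun freq_matrix tu =>
      freq_matrix.insert tu.1 (tu.2.foldl (fun row userindex =>
          PySem.List.pySetD row userindex (PySem.List.pyGetD row userindex 0 + 1))
        (List.replicate usersLen.toNat (0 : Int))))
    PySem.Dict.empty).items

-- ===== PRECONDITION & SPEC =====
-- Pre_ excludes exactly the inputs where the Python raises IndexError: some pair's user index is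
-- outside the Python index range of a [0]*usersLen row (this also covers usersLen ≤ 0 with pairs present).
def Pre_det_Act_freq_matrix (dictionary : List (Int × Int)) (usersLen : Int) : Prop :=
  ∀ p ∈ dictionary, -usersLen ≤ p.2 ∧ p.2 < usersLen
instance (dictionary : List (Int × Int)) (usersLen : Int) : Decidable (Pre_det_Act_freq_matrix dictionary usersLen) := by unfold Pre_det_Act_freq_matrix; infer_instance

def pvWitness_det_Act_freq_matrix : (List (Int × Int)) × Int := ([(1, 0), (1, 1), (2, 0), (1, -2)], 2)

def Spec_det_Act_freq_matrix (dictionary : List (Int × Int)) (usersLen : Int) (out : List (Int × List Int)) : Prop := out = det_Act_freq_matrix_alt dictionary usersLen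
instance (dictionary : List (Int × Int)) (usersLen : Int) (out : List (Int × List Int)) : Decidable (Spec_det_Act_freq_matrix dictionary usersLen out) := by unfold Spec_det_Act_freq_matrix; infer_instance

-- ===== CLAIM (what is proved, stated in full; the proofs are below) =====
def Claim_equal_det_Act_freq_matrix : Prop := ∀ (dictionary : List (Int × Int)) (usersLen : Int), Dom_det_Act_freq_matrix dictionary usersLen → Pre_det_Act_freq_matrix dictionary usersLen → Spec_det_Act_freq_matrix dictionary usersLen (det_Act_freq_matrix dictionary usersLen)

-- ===== LEMMAS AND PROOFS =====

-- lookup in a dict whose items are ts mapped through x ↦ (x, f x)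
theorem pvGet?_mapDict {ν : Type} (ts : List Int) (f : Int → ν) (t : Int) :
    (PySem.Dict.mk (ts.map fun x => (x, f x))).get? t = if t ∈ ts then some (f t) else none := by
  induction ts with
  | nil => simp [PySem.Dict.get?]
  | cons a ts ih =>
      simp only [List.map_cons, PySem.Dict.get?_mk_cons, ih]
      by_cases h : a = t
      · subst h; simp
      · simp [h, Ne.symm h, beq_iff_eq]

theorem pvInsert_mapDict_mem {ν : Type} (ts : List Int) (f : Int → ν) (t : Int) (v : ν) (ht : t ∈ ts) :
    ((PySem.Dict.mk (ts.map fun x => (x, f x))).insert t v).items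
      = ts.map (fun x => (x, if x = t then v else f x)) := by
  have hc : (PySem.Dict.mk (ts.map fun x => (x, f x))).contains t = true := by
    rw [PySem.Dict.contains_eq_isSome_get?, pvGet?_mapDict]; simp [ht]
  simp only [PySem.Dict.insert, hc, if_pos]
  simp only [List.map_map]
  refine List.map_congr_left (fun x _ => ?_)
  by_cases h : x = t
  · subst h; simp
  · simp [h, beq_iff_eq]

theorem pvInsert_mapDict_not_mem {ν : Type} (ts : List Int) (f : Int → ν) (t : Int) (v : ν) (ht : t ∉ ts) :
    ((PySem.Dict.mk (ts.map fun x => (x, f x))).insert t v).items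
      = ts.map (fun x => (x, f x)) ++ [(t, v)] := by
  have hc : (PySem.Dict.mk (ts.map fun x => (x, f x))).contains t = false := by
    rw [PySem.Dict.contains_eq_isSome_get?, pvGet?_mapDict]; simp [ht]
  simp [PySem.Dict.insert, hc]

-- ordered dedup grows on the right by one new first occurrence
theorem pvDedup_append_singleton (xs : List Int) (x : Int) :
    PySem.List.dedup (xs ++ [x])
      = if x ∈ xs then PySem.List.dedup xs else PySem.List.dedup xs ++ [x] := by
  have hc : PySem.Set.contains (PySem.List.dedup xs) x = decide (x ∈ xs) := by
    simp only [PySem.Set.contains]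
    by_cases h : x ∈ xs
    · simp [h]
    · simp only [h, decide_false]
      exact (Bool.not_eq_true _).mp
        (fun hc => h ((PySem.List.mem_dedup xs x).mp (List.contains_iff_mem.mp hc)))
  have hstep : PySem.List.dedup (xs ++ [x]) = PySem.Set.add (PySem.List.dedup xs) x := by
    simp [PySem.List.dedup, PySem.Set.ofList, List.foldl_append]
  rw [hstep, PySem.Set.add, hc]
  by_cases h : x ∈ xs <;> simp [h]

-- a key-conditional fold over pairs whose key never matches is the identity
theorem pvFoldl_ite_of_not_mem (g : List Int → Int → List Int) (t : Int) (d : List (Int × Int))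
    (v : List Int) (h : t ∉ d.map (·.1)) :
    d.foldl (fun v p => if p.1 == t then g v p.2 else v) v = v := by
  induction d generalizing v with
  | nil => rfl
  | cons p d ih =>
      have h1 : p.1 ≠ t := fun hc => h (by simp [hc])
      have h2 : t ∉ d.map (·.1) := fun hc => h (by simp only [List.map_cons, List.mem_cons]; exact Or.inr hc)
      simp only [List.foldl_cons]
      rw [if_neg (by simp [h1])]
      exact ih v h2

-- THE GENERIC SHAPE of A's loop and of B's grouping loop: one pass over the pairs, updating the
-- current value at the pair's key (starting from v0), appending unseen keys.
theorem pvFold_step_items (g : List Int → Int → List Int) (v0 : List Int) (d : List (Int × Int)) :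
    (d.foldl (fun m p =>
        match m.get? p.1 with
        | some v => m.insert p.1 (g v p.2)
        | none => m.insert p.1 (g v0 p.2)) PySem.Dict.empty).items
      = (PySem.List.dedup (d.map (·.1))).map (fun t =>
          (t, d.foldl (fun v p => if p.1 == t then g v p.2 else v) v0)) := by
  induction d using List.reverseRecOn with
  | nil => simp [PySem.Dict.empty, PySem.List.dedup, PySem.Set.ofList, PySem.Set.empty]
  | append_singleton d p ih =>
      have hD : (d.foldl (fun m p =>
          match m.get? p.1 with
          | some v => m.insert p.1 (g v p.2)
          | none => m.insert p.1 (g v0 p.2)) PySem.Dict.empty)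
          = PySem.Dict.mk ((PySem.List.dedup (d.map (·.1))).map (fun t =>
              (t, d.foldl (fun v p => if p.1 == t then g v p.2 else v) v0))) :=
        PySem.Dict.ext ih
      have hmem : p.1 ∈ PySem.List.dedup (d.map (·.1)) ↔ p.1 ∈ d.map (·.1) := PySem.List.mem_dedup _ _
      rw [List.foldl_append, List.foldl_cons, List.foldl_nil, hD]
      rw [pvGet?_mapDict]
      by_cases h : p.1 ∈ d.map (·.1)
      · rw [if_pos (hmem.mpr h)]
        rw [pvInsert_mapDict_mem _ _ _ _ (hmem.mpr h)]
        have hded : PySem.List.dedup ((d ++ [p]).map (·.1)) = PySem.List.dedup (d.map (·.1)) := by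
          rw [List.map_append, List.map_cons, List.map_nil, pvDedup_append_singleton, if_pos h]
        rw [hded]
        refine List.map_congr_left (fun x _ => ?_)
        rw [List.foldl_append, List.foldl_cons, List.foldl_nil]
        by_cases hx : x = p.1
        · subst hx; simp
        · simp [hx, Ne.symm hx, beq_iff_eq]
      · rw [if_neg (fun hc => h (hmem.mp hc))]
        rw [pvInsert_mapDict_not_mem _ _ _ _ (fun hc => h (hmem.mp hc))]
        have hded : PySem.List.dedup ((d ++ [p]).map (·.1))
            = PySem.List.dedup (d.map (·.1)) ++ [p.1] := by
          rw [List.map_append, List.map_cons, List.map_nil, pvDedup_append_singleton, if_neg h]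
        rw [hded, List.map_append]
        congr 1
        · refine List.map_congr_left (fun x hx => ?_)
          rw [List.foldl_append, List.foldl_cons, List.foldl_nil]
          have hxp : x ≠ p.1 := fun hc => h (hmem.mp (hc ▸ hx))
          simp [Ne.symm hxp, beq_iff_eq]
        · simp only [List.map_cons, List.map_nil, List.cons.injEq, Prod.mk.injEq]
          rw [List.foldl_append, List.foldl_cons, List.foldl_nil,
            pvFoldl_ite_of_not_mem g p.1 d v0 h]
          simp

-- [0]*usersLen rows hold only zeros, so the first write at u writes 0 + 1 = 1
theorem pvGetD_replicate_zero (n : Nat) (i : Int) :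
    PySem.List.pyGetD (List.replicate n (0 : Int)) i 0 = 0 := by
  simp only [PySem.List.pyGetD]
  cases h : PySem.List.pyGet? (List.replicate n (0 : Int)) i with
  | none => rfl
  | some x =>
      have := PySem.List.mem_of_pyGet?_eq_some _ h
      simp [List.eq_of_mem_replicate this]

-- folding fresh-key inserts over an association list with distinct keys just maps it
theorem pvFold_insert_fresh (l : List (Int × List Int)) (g : Int × List Int → List Int)
    (acc : PySem.Dict Int (List Int))
    (hfresh : ∀ p ∈ l, acc.contains p.1 = false) (hnd : (l.map (·.1)).Nodup) :
    (l.foldl (fun fm p => fm.insert p.1 (g p)) acc).items = acc.items ++ l.map (fun p => (p.1, g p)) := by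
  induction l generalizing acc with
  | nil => simp
  | cons p l ih =>
      simp only [List.map_cons, List.nodup_cons] at hnd
      have hpc : acc.contains p.1 = false := hfresh p (List.mem_cons_self ..)
      have hins : (acc.insert p.1 (g p)).items = acc.items ++ [(p.1, g p)] := by
        simp [PySem.Dict.insert, hpc]
      simp only [List.foldl_cons]
      rw [ih (acc.insert p.1 (g p)) ?_ hnd.2]
      · simp [hins]
      · intro q hq
        have hq1 : q.1 ≠ p.1 := fun hc => hnd.1 (hc ▸ List.mem_map_of_mem hq)
        have h0 := hfresh q (List.mem_cons_of_mem _ hq)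
        simp only [PySem.Dict.contains] at h0 ⊢
        simp only [hins, List.any_append, h0, Bool.false_or, List.any_cons, List.any_nil,
          Bool.or_false]
        exact beq_eq_false_iff_ne.mpr (fun hc => hq1 hc.symm)

-- A's loop body, rewritten into the generic shape (the unseen branch writes 1 = 0 + 1 into a zero row)
theorem pvStepA_eq (usersLen : Int) :
    (fun (freq_matrix : PySem.Dict Int (List Int)) (vals : Int × Int) =>
        match freq_matrix.get? vals.1 with
        | some row => freq_matrix.insert vals.1
            (PySem.List.pySetD row vals.2 (PySem.List.pyGetD row vals.2 0 + 1))
        | none => freq_matrix.insert vals.1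
            (PySem.List.pySetD (List.replicate usersLen.toNat (0 : Int)) vals.2 1))
      = (fun m p =>
        match m.get? p.1 with
        | some v => m.insert p.1 (PySem.List.pySetD v p.2 (PySem.List.pyGetD v p.2 0 + 1))
        | none => m.insert p.1 (PySem.List.pySetD (List.replicate usersLen.toNat (0 : Int)) p.2
            (PySem.List.pyGetD (List.replicate usersLen.toNat (0 : Int)) p.2 0 + 1))) := by
  funext m p
  cases h : m.get? p.1 <;> simp [pvGetD_replicate_zero]

-- B's grouping body, rewritten into the generic shape
theorem pvStepB_eq :
    (fun (per_task : PySem.Dict Int (List Int)) (p : Int × Int) =>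
        per_task.modify p.1 [] (fun us => us ++ [p.2]))
      = (fun m p =>
        match m.get? p.1 with
        | some v => m.insert p.1 (v ++ [p.2])
        | none => m.insert p.1 ([] ++ [p.2])) := by
  funext m p
  cases h : m.get? p.1 <;> simp [PySem.Dict.modify, PySem.Dict.getD, h]

-- the grouping fold collects, per task, exactly the user indices of its pairs, in order
theorem pvGroup_eq_filter_map (t : Int) (d : List (Int × Int)) (acc : List Int) :
    d.foldl (fun v p => if p.1 == t then v ++ [p.2] else v) acc
      = acc ++ (d.filter (fun p => p.1 == t)).map (·.2) := by
  induction d generalizing acc with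
  | nil => simp
  | cons p d ih =>
      simp only [List.foldl_cons, List.filter_cons]
      by_cases h : p.1 = t
      · rw [if_pos (by simp [h]), if_pos (by simp [h]), ih (acc ++ [p.2])]
        simp
      · rw [if_neg (by simp [h]), if_neg (by simp [h])]
        exact ih acc

-- ===== VERDICT (by name: the statement is the Claim_ definition above) =====
theorem det_Act_freq_matrix_spec : Claim_equal_det_Act_freq_matrix := by
  intro dictionary usersLen _hdom _hpre
  unfold Spec_det_Act_freq_matrix det_Act_freq_matrix det_Act_freq_matrix_alt
  rw [pvStepA_eq, pvStepB_eq,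
    pvFold_step_items (fun row u => PySem.List.pySetD row u (PySem.List.pyGetD row u 0 + 1))
      (List.replicate usersLen.toNat (0 : Int)) dictionary,
    pvFold_step_items (fun us u => us ++ [u]) [] dictionary]
  set ts := PySem.List.dedup (dictionary.map (·.1)) with hts
  have hnd : ts.Nodup := by rw [hts]; exact PySem.List.nodup_dedup _
  rw [pvFold_insert_fresh _ _ PySem.Dict.empty
      (fun p _ => by simp [PySem.Dict.empty, PySem.Dict.contains])
      (by simpa [Function.comp_def] using hnd)]
  simp only [PySem.Dict.empty, List.nil_append, List.map_map]
  refine List.map_congr_left (fun t _ => ?_)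
  simp only [Function.comp]
  congr 1
  rw [pvGroup_eq_filter_map, List.nil_append, List.foldl_map, List.foldl_filter]
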